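-- pv_equiv track=rewrite | github.com/zoeerin/semantic-tagging | food_label.py | build_name_vocab
-- ===== SOURCE A (Python) =====
-- PAD = '_PAD'
--
-- UNK = '_UNK'
--
-- PAD_ID = 0
--
-- UNK_ID = 1
--
-- def build_name_vocab(data_set):
--     vocab_usda_name = {}
--     vocab_usda_name[PAD] = PAD_ID
--     vocab_usda_name[UNK] = UNK_ID
--     count = 2
--     for item in data_set:
--         names = item[0]
--         for w in names:
--             if w not in vocab_usda_name:
--                 vocab_usda_name[w] = count
--                 count += 1
--     return vocab_usda_name
-- ===== SOURCE B (Python) =====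
-- PAD = '_PAD'
-- UNK = '_UNK'
-- PAD_ID = 0
-- UNK_ID = 1
--
-- def build_name_vocab(data_set):
--     # Flatten, then record first-occurrence indices by a BACKWARDS overwrite
--     # (no membership tests), and argsort the words by that index to number them.
--     flat = [w for item in data_set for w in item[0]]
--     first = {}
--     for i, w in reversed(list(enumerate(flat))):
--         first[w] = i
--     vocab = {PAD: PAD_ID, UNK: UNK_ID}
--     nid = 2
--     for w in sorted(first, key=lambda w: first[w]):
--         if w != PAD and w != UNK:
--             vocab[w] = nid
--             nid += 1
--     return vocab
-- ===== Notes on version B (the rewrite author's own statement) =====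
-- stated objective: alternative
-- what changed: A interleaves a membership check and counter-assignment in one nested online loop; B instead flattens the words, computes each word's first-occurrence index with a backwards overwrite pass (no membership tests), argsorts the distinct words by that index and numbers them from 2.
import Mathlib
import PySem

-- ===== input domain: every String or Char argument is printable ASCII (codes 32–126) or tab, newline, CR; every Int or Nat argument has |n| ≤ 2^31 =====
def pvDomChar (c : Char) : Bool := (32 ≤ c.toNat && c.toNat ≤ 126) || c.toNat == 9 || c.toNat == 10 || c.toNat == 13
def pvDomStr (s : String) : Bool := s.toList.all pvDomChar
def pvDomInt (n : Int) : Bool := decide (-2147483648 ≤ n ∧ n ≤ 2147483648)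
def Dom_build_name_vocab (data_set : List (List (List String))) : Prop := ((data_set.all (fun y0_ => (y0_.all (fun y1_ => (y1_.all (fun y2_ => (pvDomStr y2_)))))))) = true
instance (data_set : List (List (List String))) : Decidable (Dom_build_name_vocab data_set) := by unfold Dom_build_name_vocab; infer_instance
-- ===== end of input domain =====

-- B replaces A's nested online check-and-assign loop by: flatten, compute each word's
-- first-occurrence index with a backwards overwrite pass (no membership tests),
-- argsort the distinct words by that index, then number them from 2. Same result, different algorithm.

-- ===== PORT A =====
-- loop body of A's inner 'for w in names'
def pvStepA (st : PySem.Dict String Int × Int) (w : String) : PySem.Dict String Int × Int :=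
  if st.1.contains w then st else (st.1.insert w st.2, st.2 + 1)

def build_name_vocab (data_set : List (List (List String))) : List (String × Int) :=
  let init : PySem.Dict String Int := (PySem.Dict.empty.insert "_PAD" 0).insert "_UNK" 1
  let fin := data_set.foldl (fun st item =>
    let names := (PySem.List.pyGet? item 0).getD []   -- item[0]; none (IndexError) excluded by Pre_
    names.foldl pvStepA st) (init, 2)
  fin.1.items

-- ===== PORT B =====
-- loop body of B's numbering pass 'for w in sorted(first, key=…)'
def pvStepB (st : PySem.Dict String Int × Int) (w : String) : PySem.Dict String Int × Int :=
  if w == "_PAD" || w == "_UNK" then st else (st.1.insert w st.2, st.2 + 1)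

def build_name_vocab_alt (data_set : List (List (List String))) : List (String × Int) :=
  let flat := data_set.flatMap (fun item => (PySem.List.pyGet? item 0).getD [])  -- item[0] total under Pre_
  -- for i, w in reversed(list(enumerate(flat))): first[w] = i
  let first := (PySem.List.enumerate flat 0).reverse.foldl
      (fun d p => d.insert p.2 p.1) PySem.Dict.empty
  -- sorted(first, key=lambda w: first[w]); every w iterated is a key of first, so first[w] = first.getD w 0
  let ordered := PySem.List.sorted first.keys (fun w => first.getD w 0) false
  let fin := ordered.foldl pvStepB (PySem.Dict.ofList [("_PAD", 0), ("_UNK", 1)], 2)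
  fin.1.items

-- ===== PRECONDITION & SPEC =====
-- A raises IndexError on item[0] when some item is empty; exactly those inputs are excluded (B raises there too).
def Pre_build_name_vocab (data_set : List (List (List String))) : Prop :=
  ∀ item ∈ data_set, item ≠ []
instance (data_set : List (List (List String))) : Decidable (Pre_build_name_vocab data_set) := by unfold Pre_build_name_vocab; infer_instance
def pvWitness_build_name_vocab : List (List (List String)) := [[["a", "b"], ["z"]], [["_PAD", "a", "c"]]]

def Spec_build_name_vocab (data_set : List (List (List String))) (out : List (String × Int)) : Prop := out = build_name_vocab_alt data_set
instance (data_set : List (List (List String))) (out : List (String × Int)) : Decidable (Spec_build_name_vocab data_set out) := by unfold Spec_build_name_vocab; infer_instance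

-- ===== CLAIM (what is proved, stated in full; the proofs are below) =====
def Claim_equal_build_name_vocab : Prop := ∀ (data_set : List (List (List String))), Dom_build_name_vocab data_set → Pre_build_name_vocab data_set → Spec_build_name_vocab data_set (build_name_vocab data_set)

-- ===== LEMMAS AND PROOFS =====

-- first-occurrence dedup relative to a set of already-seen words
def pvDedupNotIn (seen : List String) : List String → List String
  | [] => []
  | w :: ws => if w ∈ seen then pvDedupNotIn seen ws else w :: pvDedupNotIn (w :: seen) ws

-- the pure "insert and bump" step (the guarded steps with the guard resolved to false)
def pvStepIns (st : PySem.Dict String Int × Int) (w : String) : PySem.Dict String Int × Int :=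
  (st.1.insert w st.2, st.2 + 1)

theorem pv_foldl_flatMap (f : List (List String) → List String)
    (l : List (List (List String))) (st : PySem.Dict String Int × Int) :
    l.foldl (fun st item => (f item).foldl pvStepA st) st
      = (l.flatMap f).foldl pvStepA st := by
  induction l generalizing st with
  | nil => rfl
  | cons x xs ih => simp [List.foldl_append, ih]

theorem pv_set_foldl_add (xs : List String) : ∀ (s : List String), s.Nodup →
    xs.foldl PySem.Set.add s = s ++ (PySem.Set.ofList xs).filter (fun x => decide (x ∉ s)) := by
  induction xs with
  | nil => intro s _; simp [PySem.Set.ofList]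
  | cons x xs ih =>
    intro s hs
    have hofl : PySem.Set.ofList (x :: xs)
        = x :: (PySem.Set.ofList xs).filter (fun y => decide (y ∉ ([x] : List String))) := by
      have := ih [x] (by simp)
      simpa [PySem.Set.ofList, PySem.Set.add, PySem.Set.contains] using this
    by_cases hx : x ∈ s
    · have hadd : PySem.Set.add s x = s := by
        simp [PySem.Set.add, PySem.Set.contains, hx]
      rw [List.foldl_cons, hadd, ih s hs, hofl]
      simp only [List.filter_cons]
      have : (decide (x ∉ s)) = false := by simp [hx]
      rw [this]
      congr 1
      rw [List.filter_filter]
      apply List.filter_congr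
      intro y _
      by_cases hy : y ∈ s
      · simp [hy]
      · have : y ≠ x := fun h => hy (h ▸ hx)
        simp [hy, this]
    · have hadd : PySem.Set.add s x = s ++ [x] := by
        simp [PySem.Set.add, PySem.Set.contains, hx]
      rw [List.foldl_cons, hadd, ih (s ++ [x]) (by refine hs.append (List.nodup_singleton x) ?_; intro a ha hmem; rw [List.mem_singleton] at hmem; exact hx (hmem ▸ ha)), hofl]
      simp only [List.filter_cons]
      have : (decide (x ∉ s)) = true := by simp [hx]
      rw [this]
      simp only [List.append_assoc, List.singleton_append]
      congr 2
      rw [List.filter_filter]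
      apply List.filter_congr
      intro y _
      by_cases hy : y = x
      · simp [hy]
      · simp [hy]

theorem pv_dedup_cons (x : String) (xs : List String) :
    PySem.List.dedup (x :: xs) = x :: (PySem.List.dedup xs).filter (fun y => decide (y ≠ x)) := by
  have h1 : PySem.List.dedup (x :: xs) = (x :: xs).foldl PySem.Set.add [] := by
    rw [PySem.List.dedup_eq_ofList, PySem.Set.ofList_eq_foldl]
  have h2 : PySem.List.dedup xs = xs.foldl PySem.Set.add [] := by
    rw [PySem.List.dedup_eq_ofList, PySem.Set.ofList_eq_foldl]
  rw [h1, List.foldl_cons]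
  have hadd : PySem.Set.add ([] : List String) x = [x] := by rfl
  rw [hadd, pv_set_foldl_add xs [x] (by simp)]
  have h3 : PySem.Set.ofList xs = PySem.List.dedup xs := (PySem.List.dedup_eq_ofList xs).symm
  rw [h3]
  simp only [List.singleton_append]
  congr 1
  apply List.filter_congr
  intro y _
  simp

theorem pv_dedupNotIn_eq_filter_dedup (ws : List String) : ∀ (seen : List String),
    pvDedupNotIn seen ws = (PySem.List.dedup ws).filter (fun w => decide (w ∉ seen)) := by
  induction ws with
  | nil => intro seen; rfl
  | cons x ws ih =>
    intro seen
    rw [pv_dedup_cons]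
    by_cases hx : x ∈ seen
    · rw [pvDedupNotIn, if_pos hx, ih seen]
      simp only [List.filter_cons]
      have : (decide (x ∉ seen)) = false := by simp [hx]
      rw [this, List.filter_filter]
      apply List.filter_congr
      intro y _
      by_cases hy : y ∈ seen
      · simp [hy]
      · have : y ≠ x := fun h => hy (h ▸ hx)
        simp [hy, this]
    · rw [pvDedupNotIn, if_neg hx, ih (x :: seen)]
      simp only [List.filter_cons]
      have : (decide (x ∉ seen)) = true := by simp [hx]
      rw [this, List.filter_filter]
      congr 1
      apply List.filter_congr
      intro y _
      by_cases hy : y = x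
      · simp [hy]
      · by_cases hy2 : y ∈ seen <;> simp [hy, hy2]

-- A's fold equals the pure insert fold over the seen-relative dedup
theorem pv_foldA_eq_foldIns (ws : List String) : ∀ (d : PySem.Dict String Int) (c : Int)
    (seen : List String), (∀ w, d.contains w = true ↔ w ∈ seen) →
    ws.foldl pvStepA (d, c) = (pvDedupNotIn seen ws).foldl pvStepIns (d, c) := by
  induction ws with
  | nil => intro d c seen _; rfl
  | cons w ws ih =>
    intro d c seen hinv
    by_cases hw : w ∈ seen
    · have hc : d.contains w = true := (hinv w).mpr hw
      rw [List.foldl_cons]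
      have : pvStepA (d, c) w = (d, c) := by simp [pvStepA, hc]
      rw [this, pvDedupNotIn, if_pos hw, ih d c seen hinv]
    · have hc : d.contains w = false := by
        by_contra h
        exact hw ((hinv w).mp (by simpa using h))
      rw [List.foldl_cons]
      have : pvStepA (d, c) w = (d.insert w c, c + 1) := by simp [pvStepA, hc]
      rw [this, pvDedupNotIn, if_neg hw, List.foldl_cons]
      have hstep : pvStepIns (d, c) w = (d.insert w c, c + 1) := rfl
      rw [hstep]
      apply ih
      intro x
      rw [PySem.Dict.contains_insert]
      constructor
      · intro h
        rcases Bool.or_eq_true_iff.mp h with h' | h'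
        · exact List.mem_cons.mpr (Or.inl (by simpa using (eq_of_beq h')))
        · exact List.mem_cons.mpr (Or.inr ((hinv x).mp h'))
      · intro h
        rcases List.mem_cons.mp h with h' | h'
        · subst h'; simp
        · exact Bool.or_eq_true_iff.mpr (Or.inr ((hinv x).mpr h'))

-- B's numbering fold: the guard skips exactly '_PAD'/'_UNK', on the rest it is the pure insert fold
theorem pv_foldB_eq_foldIns (ws : List String) : ∀ (st : PySem.Dict String Int × Int),
    ws.foldl pvStepB st
      = (ws.filter (fun w => decide (w ∉ (["_PAD", "_UNK"] : List String)))).foldl pvStepIns st := by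
  induction ws with
  | nil => intro st; rfl
  | cons w ws ih =>
    intro st
    by_cases h1 : w = "_PAD"
    · subst h1; simp [pvStepB, ih]
    · by_cases h2 : w = "_UNK"
      · subst h2; simp [pvStepB, ih]
      · simp [pvStepB, pvStepIns, h1, h2, ih]

-- the backwards-overwrite dict, as a foldr over the (unreversed) pair list
def pvFirst (ps : List (Int × String)) : PySem.Dict String Int :=
  ps.foldr (fun p d => d.insert p.2 p.1) PySem.Dict.empty

theorem pv_get?_pvFirst (ps : List (Int × String)) (k : String) :
    (pvFirst ps).get? k = (ps.find? (fun p => p.2 == k)).map Prod.fst := by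
  induction ps with
  | nil => simp [pvFirst]
  | cons p ps ih =>
    by_cases hk : k = p.2
    · simp [pvFirst, List.foldr_cons, hk]
    · have : (p.2 == k) = false := by simp [Ne.symm hk]
      simp only [pvFirst, List.foldr_cons] at *
      rw [PySem.Dict.get?_insert, if_neg hk, ih, List.find?_cons, this]

theorem pv_mem_keys_pvFirst (ps : List (Int × String)) (k : String) :
    k ∈ (pvFirst ps).keys ↔ k ∈ ps.map Prod.snd := by
  induction ps with
  | nil => simp [pvFirst, PySem.Dict.keys_empty]
  | cons p ps ih =>
    simp only [pvFirst, List.foldr_cons, List.map_cons, List.mem_cons] at *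
    rw [PySem.Dict.mem_keys_insert, ih]

theorem pv_nodup_keys_pvFirst (ps : List (Int × String)) : (pvFirst ps).keys.Nodup := by
  induction ps with
  | nil => exact PySem.Dict.nodup_keys_empty
  | cons p ps ih => exact PySem.Dict.nodup_keys_insert _ _ _ ih

theorem pv_find?_enumerate (xs : List String) : ∀ (s : Int), ∀ w ∈ xs,
    (PySem.List.enumerate xs s).find? (fun p => p.2 == w)
      = some (s + (xs.idxOf w : Nat), w) := by
  induction xs with
  | nil => intro s w hw; cases hw
  | cons x xs ih =>
    intro s w hw
    rw [PySem.List.enumerate_cons, List.find?_cons]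
    by_cases hx : x = w
    · subst hx
      simp [List.idxOf_cons_self]
    · have hb : (x == w) = false := by simp [hx]
      rw [hb]
      have hw' : w ∈ xs := by
        rcases List.mem_cons.mp hw with h | h
        · exact absurd h.symm hx
        · exact h
      rw [ih (s + 1) w hw', List.idxOf_cons_ne _ (fun h => hx h)]
      push_cast
      ring_nf

theorem pv_pairwise_idxOf (xs : List String) :
    (PySem.List.dedup xs).Pairwise (fun a b => xs.idxOf a < xs.idxOf b) := by
  induction xs with
  | nil => simp [PySem.List.dedup_eq_ofList, PySem.Set.ofList]
  | cons x xs ih =>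
    rw [pv_dedup_cons]
    apply List.Pairwise.cons
    · intro b hb
      have hbx : b ≠ x := by
        have := (List.mem_filter.mp hb).2
        simpa using this
      rw [List.idxOf_cons_self, List.idxOf_cons_ne _ (Ne.symm hbx)]
      exact Nat.succ_pos _
    · have hp := ih.filter (fun y => decide (y ≠ x))
      apply hp.imp_of_mem
      intro a b ha hb hab
      have hax : a ≠ x := by simpa using (List.mem_filter.mp ha).2
      have hbx : b ≠ x := by simpa using (List.mem_filter.mp hb).2
      rw [List.idxOf_cons_ne _ (Ne.symm hax), List.idxOf_cons_ne _ (Ne.symm hbx)]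
      exact Nat.succ_lt_succ hab

-- the argsort returns the distinct words in first-occurrence order
theorem pv_sorted_eq_dedup (flat : List String) :
    PySem.List.sorted (pvFirst (PySem.List.enumerate flat 0).reverse.reverse).keys
      (fun w => (pvFirst (PySem.List.enumerate flat 0).reverse.reverse).getD w 0) false
      = PySem.List.dedup flat := by
  rw [List.reverse_reverse]
  have hmem : ∀ k, k ∈ (pvFirst (PySem.List.enumerate flat 0)).keys ↔ k ∈ flat := by
    intro k
    rw [pv_mem_keys_pvFirst]
    have : (PySem.List.enumerate flat 0).map Prod.snd = flat := PySem.List.map_snd_enumerate flat 0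
    rw [this]
  have hkey : ∀ w ∈ flat, (pvFirst (PySem.List.enumerate flat 0)).getD w 0 = (flat.idxOf w : Nat) := by
    intro w hw
    rw [PySem.Dict.getD_eq_get?_getD, pv_get?_pvFirst, pv_find?_enumerate flat 0 w hw]
    simp
  apply PySem.List.sorted_eq_of_perm_of_pairwise_lt
  · rw [List.perm_ext_iff_of_nodup (by rw [PySem.List.dedup_eq_ofList]; exact PySem.Set.nodup_ofList flat) (pv_nodup_keys_pvFirst _)]
    intro a
    rw [hmem, PySem.List.dedup_eq_ofList, PySem.Set.mem_ofList]
  · apply (pv_pairwise_idxOf flat).imp_of_mem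
    intro a b ha hb hab
    have ha' : a ∈ flat := by rw [PySem.List.dedup_eq_ofList, PySem.Set.mem_ofList] at ha; exact ha
    have hb' : b ∈ flat := by rw [PySem.List.dedup_eq_ofList, PySem.Set.mem_ofList] at hb; exact hb
    rw [hkey a ha', hkey b hb']
    exact_mod_cast hab

-- ===== VERDICT (by name: the statement is the Claim_ definition above) =====
theorem build_name_vocab_spec : Claim_equal_build_name_vocab := by
  intro data_set _ _
  simp only [Spec_build_name_vocab, build_name_vocab, build_name_vocab_alt]
  have hfold : (PySem.List.enumerate (data_set.flatMap fun item => (PySem.List.pyGet? item 0).getD []) 0).reverse.foldl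
      (fun d p => d.insert p.2 p.1) PySem.Dict.empty
      = pvFirst (PySem.List.enumerate (data_set.flatMap fun item => (PySem.List.pyGet? item 0).getD []) 0).reverse.reverse := by
    rw [List.reverse_reverse]
    exact List.foldl_reverse
  have hinit : ((PySem.Dict.empty.insert "_PAD" (0 : Int)).insert "_UNK" 1)
      = PySem.Dict.ofList [("_PAD", (0 : Int)), ("_UNK", 1)] := by rfl
  have hkeys : (PySem.Dict.ofList [("_PAD", (0 : Int)), ("_UNK", 1)]).keys
      = ["_PAD", "_UNK"] := by rfl
  have hinv0 : ∀ w, (PySem.Dict.ofList [("_PAD", (0 : Int)), ("_UNK", 1)]).contains w = true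
      ↔ w ∈ (["_PAD", "_UNK"] : List String) := by
    intro w
    rw [PySem.Dict.contains_iff_mem_keys, hkeys]
  rw [pv_foldl_flatMap, hinit, hfold, pv_sorted_eq_dedup, pv_foldB_eq_foldIns,
      pv_foldA_eq_foldIns _ _ _ ["_PAD", "_UNK"] hinv0,
      pv_dedupNotIn_eq_filter_dedup]
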